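-- pv_equiv track=rewrite | github.com/meiqw/restaurant-ner | restaurant_ner.py | helper
-- ===== SOURCE A (Python) =====
-- def helper(length, label):
--     res = []
--     if length == 1:
--         res.append("U-" + label)
--     elif length > 1:
--         res.append("B-" + label)
--         for i in range(length - 2):
--             res.append("I-" + label)
--         res.append("L-" + label)
--     return res
-- ===== SOURCE B (Python) =====
-- def helper(length, label):
--     if length <= 0:
--         return []
--     code = "U" if length == 1 else "B" + "I" * (length - 2) + "L"
--     return [c + "-" + label for c in code]
-- ===== Notes on version B (the rewrite author's own statement) =====
-- stated objective: alternative
-- what changed: Encodes the span shape as a BILOU letter string first ("U" or "B"+"I"*(n-2)+"L" built by string repetition, no loop), then expands each letter into its full tag in a second mapping pass, replacing A's direct segment-wise appends with a staged data-driven construction.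
import Mathlib
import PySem

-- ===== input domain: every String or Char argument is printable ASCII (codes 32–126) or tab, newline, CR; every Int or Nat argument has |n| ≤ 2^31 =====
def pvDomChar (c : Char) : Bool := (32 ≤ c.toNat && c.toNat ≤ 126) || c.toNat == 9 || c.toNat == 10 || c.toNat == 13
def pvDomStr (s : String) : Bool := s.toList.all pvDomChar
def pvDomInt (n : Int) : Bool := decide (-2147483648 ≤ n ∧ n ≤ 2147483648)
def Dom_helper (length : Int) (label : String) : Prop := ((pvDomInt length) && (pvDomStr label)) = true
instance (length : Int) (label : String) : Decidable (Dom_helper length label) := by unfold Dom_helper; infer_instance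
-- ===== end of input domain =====

-- B: builds a BILOU letter code string first ("U" or "B"+"I"*(n-2)+"L"), then expands each
-- letter into its tag in a second pass — staged data-driven construction instead of A's
-- segment-wise appends; same cost.

-- ===== PORT A =====
def helper (length : Int) (label : String) : List String :=
  let res : List String := []
  if length == 1 then
    res ++ ["U-" ++ label]
  else if length > 1 then
    let res := res ++ ["B-" ++ label]
    let res := (PySem.List.pyRange 0 (length - 2) 1).foldl (fun r _ => r ++ ["I-" ++ label]) res
    res ++ ["L-" ++ label]
  else res

-- ===== PORT B =====
-- the code string is represented as List Char; "I" * (length - 2) is string repetition,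
-- ported exactly as List.replicate (length - 2 ≥ 0 here, so .toNat is exact)
def helper_alt (length : Int) (label : String) : List String :=
  if length ≤ 0 then []
  else
    let code : List Char :=
      if length == 1 then ['U']
      else ['B'] ++ List.replicate (length - 2).toNat 'I' ++ ['L']
    code.map (fun c => String.ofList [c] ++ "-" ++ label)

-- ===== PRECONDITION & SPEC =====
def Spec_helper (length : Int) (label : String) (out : List String) : Prop := out = helper_alt length label
instance (length : Int) (label : String) (out : List String) : Decidable (Spec_helper length label out) := by unfold Spec_helper; infer_instance

-- ===== CLAIM (what is proved, stated in full; the proofs are below) =====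
def Claim_equal_helper : Prop := ∀ (length : Int) (label : String), Dom_helper length label → Spec_helper length label (helper length label)

-- ===== LEMMAS AND PROOFS =====

theorem helper_eq (length : Int) (label : String) :
    helper length label = helper_alt length label := by
  unfold helper helper_alt
  rcases lt_trichotomy length 1 with h | h | h
  · have h1 : (length == 1) = false := by simp; omega
    have h2 : ¬ length > 1 := by omega
    have h3 : length ≤ 0 := by omega
    simp [h1, h2, h3]
  · subst h
    norm_num
    rfl
  · have h1 : (length == 1) = false := by simp; omega
    have h3 : ¬ length ≤ 0 := by omega
    simp only [h1, Bool.false_eq_true, if_false, if_pos h, if_neg h3, List.nil_append,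
      PySem.List.foldl_append_singleton_eq_map]
    rw [List.map_const', PySem.List.length_pyRange_one]
    simp only [List.map_append, List.map_replicate, List.map_cons, List.map_nil]
    have hB : String.ofList ['B'] ++ "-" ++ label = "B-" ++ label := rfl
    have hI : String.ofList ['I'] ++ "-" ++ label = "I-" ++ label := rfl
    have hL : String.ofList ['L'] ++ "-" ++ label = "L-" ++ label := rfl
    rw [hB, hI, hL]
    simp

-- ===== VERDICT (by name: the statement is the Claim_ definition above) =====
theorem helper_spec : Claim_equal_helper := by
  intro length label _
  exact helper_eq length label
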